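-- pv_equiv track=rewrite | github.com/lisa-belle-suzuki/algorithm_study | atcoder/ABC186C.py | isOkay
-- ===== SOURCE A (Python) =====
-- def isOkay(num: int) -> bool:
--     # 10進法
--     num_ = num
--     while num_ > 0:
--         if num_ % 10 == 7:
--             return False
--         num_ //= 10
--     # 8進法
--     num_ = num
--     while num_ > 0:
--         if num_ % 8 == 7:
--             return False
--         num_ //= 8
--
--     return True
-- ===== SOURCE B (Python) =====
-- def isOkay(num: int) -> bool:
--     # String-based: convert once to decimal and octal text, test for the digit '7'.
--     if num <= 0:
--         return True
--     return '7' not in str(num) and '7' not in oct(num)[2:]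
-- ===== Notes on version B (the rewrite author's own statement) =====
-- stated objective: idiomatic
-- what changed: Replaces the two arithmetic digit-extraction while-loops with string conversions (str and oct) and substring membership tests, after the same non-positive guard.
import Mathlib
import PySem

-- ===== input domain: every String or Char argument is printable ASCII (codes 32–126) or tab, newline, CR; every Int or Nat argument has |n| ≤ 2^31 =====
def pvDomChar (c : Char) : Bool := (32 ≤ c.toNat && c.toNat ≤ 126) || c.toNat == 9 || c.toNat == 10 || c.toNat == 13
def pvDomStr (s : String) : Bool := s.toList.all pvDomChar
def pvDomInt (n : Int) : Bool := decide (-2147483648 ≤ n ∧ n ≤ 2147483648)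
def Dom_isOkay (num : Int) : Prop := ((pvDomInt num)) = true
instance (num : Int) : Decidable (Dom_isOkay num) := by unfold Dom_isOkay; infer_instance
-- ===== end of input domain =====

-- B replaces A's two arithmetic digit-extraction loops by string conversions
-- (str / oct) and a substring membership test; same cost, more idiomatic.

-- ===== PORT A =====
-- first while loop: while num_ > 0: if num_ % 10 == 7: return False; num_ //= 10
def isOkayDecLoop (n : Int) : Bool :=
  if h : 0 < n then
    if PySem.Int.mod n 10 == 7 then false
    else isOkayDecLoop (PySem.Int.floordiv n 10)
  else true
termination_by n.toNat
decreasing_by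
  rw [PySem.Int.floordiv_eq_ediv_of_pos (by omega : (0:Int) < 10)]; omega

-- second while loop: while num_ > 0: if num_ % 8 == 7: return False; num_ //= 8
def isOkayOctLoop (n : Int) : Bool :=
  if h : 0 < n then
    if PySem.Int.mod n 8 == 7 then false
    else isOkayOctLoop (PySem.Int.floordiv n 8)
  else true
termination_by n.toNat
decreasing_by
  rw [PySem.Int.floordiv_eq_ediv_of_pos (by omega : (0:Int) < 8)]; omega

def isOkay (num : Int) : Bool :=
  -- a 'return False' inside a loop is the loop helper returning false
  if isOkayDecLoop num then isOkayOctLoop num else false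

-- ===== PORT B =====
-- octal digits of n, most significant first; for n > 0, oct(n) = "0o" ++ these
def pyOctDigits (n : Int) : List Char :=
  if h : 0 < n then
    pyOctDigits (PySem.Int.floordiv n 8) ++ [Nat.digitChar (PySem.Int.mod n 8).toNat]
  else []
termination_by n.toNat
decreasing_by
  rw [PySem.Int.floordiv_eq_ediv_of_pos (by omega : (0:Int) < 8)]; omega

def isOkay_alt (num : Int) : Bool :=
  if num ≤ 0 then true
  else
    -- '7' not in str(num)
    (!PySem.Chars.isIn ['7'] (PySem.Int.toChars num)) &&
    -- '7' not in oct(num)[2:]  (oct(num) = '0'::'o'::digits, exact for num > 0)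
    (!PySem.Chars.isIn ['7'] (PySem.List.slice ('0'::'o'::pyOctDigits num) (some 2) none))

-- ===== PRECONDITION & SPEC =====
def Spec_isOkay (num : Int) (out : Bool) : Prop := out = isOkay_alt num
instance (num : Int) (out : Bool) : Decidable (Spec_isOkay num out) := by unfold Spec_isOkay; infer_instance

-- ===== CLAIM (what is proved, stated in full; the proofs are below) =====
def Claim_equal_isOkay : Prop := ∀ (num : Int), Dom_isOkay num → Spec_isOkay num (isOkay num)

-- ===== LEMMAS AND PROOFS =====

-- "some decimal digit of n is 7", mirroring the emission order of Nat.toDigitsCore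
def has7d (n : Nat) : Bool :=
  (n % 10 == 7) || (if h : n / 10 = 0 then false else has7d (n / 10))
termination_by n
decreasing_by omega

def has7o (n : Nat) : Bool :=
  (n % 8 == 7) || (if h : n / 8 = 0 then false else has7o (n / 8))
termination_by n
decreasing_by omega

lemma digitChar7 : ∀ d : Nat, d < 16 → (Nat.digitChar d = '7' ↔ d = 7) := by decide

lemma seven_eq_digitChar (d : Nat) (hd : d < 16) : ('7' = Nat.digitChar d) ↔ d = 7 := by
  rw [eq_comm]; exact digitChar7 d hd

lemma mem7_core : ∀ fuel n ds, n < fuel →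
    ('7' ∈ Nat.toDigitsCore 10 fuel n ds ↔ (has7d n = true ∨ '7' ∈ ds)) := by
  intro fuel
  induction fuel with
  | zero => intro n ds h; omega
  | succ f ih =>
    intro n ds h
    rw [has7d]
    simp only [Nat.toDigitsCore]
    by_cases h0 : n / 10 = 0
    · rw [if_pos h0, dif_pos h0]
      simp [List.mem_cons, seven_eq_digitChar (n % 10) (by omega)]
    · rw [if_neg h0, dif_neg h0]
      rw [ih (n / 10) _ (by omega)]
      simp [List.mem_cons, seven_eq_digitChar (n % 10) (by omega)]
      tauto

lemma mem7_toChars (n : Int) (hn : 0 < n) :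
    ('7' ∈ PySem.Int.toChars n ↔ has7d n.toNat = true) := by
  unfold PySem.Int.toChars
  rw [if_neg (by omega)]
  unfold Nat.toDigits
  rw [mem7_core (n.toNat + 1) n.toNat [] (by omega)]
  simp

lemma decLoop_eq : ∀ n : Int, isOkayDecLoop n = !has7d n.toNat := by
  intro n
  induction n using isOkayDecLoop.induct with
  | case1 n h h7 =>
    rw [isOkayDecLoop, dif_pos h, if_pos h7]
    rw [PySem.Int.mod_eq_emod_of_pos (by omega : (0:Int) < 10)] at h7
    rw [has7d]
    have : n.toNat % 10 = 7 := by simp at h7; omega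
    simp [this]
  | case2 n h h7 ih =>
    rw [isOkayDecLoop, dif_pos h, if_neg h7]
    rw [PySem.Int.mod_eq_emod_of_pos (by omega : (0:Int) < 10)] at h7
    rw [ih]
    conv_rhs => rw [has7d]
    have hm : ¬ n.toNat % 10 = 7 := by simp at h7; omega
    have hq : (PySem.Int.floordiv n 10).toNat = n.toNat / 10 := by
      rw [PySem.Int.floordiv_eq_ediv_of_pos (by omega : (0:Int) < 10)]; omega
    rw [hq]
    by_cases h0 : n.toNat / 10 = 0
    · simp [h0, hm, has7d]
    · rw [dif_neg h0]; simp [hm]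
  | case3 n h =>
    rw [isOkayDecLoop, dif_neg h]
    have : n.toNat = 0 := by omega
    rw [this, has7d]
    simp

lemma octLoop_eq : ∀ n : Int, isOkayOctLoop n = !has7o n.toNat := by
  intro n
  induction n using isOkayOctLoop.induct with
  | case1 n h h7 =>
    rw [isOkayOctLoop, dif_pos h, if_pos h7]
    rw [PySem.Int.mod_eq_emod_of_pos (by omega : (0:Int) < 8)] at h7
    rw [has7o]
    have : n.toNat % 8 = 7 := by simp at h7; omega
    simp [this]
  | case2 n h h7 ih =>
    rw [isOkayOctLoop, dif_pos h, if_neg h7]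
    rw [PySem.Int.mod_eq_emod_of_pos (by omega : (0:Int) < 8)] at h7
    rw [ih]
    conv_rhs => rw [has7o]
    have hm : ¬ n.toNat % 8 = 7 := by simp at h7; omega
    have hq : (PySem.Int.floordiv n 8).toNat = n.toNat / 8 := by
      rw [PySem.Int.floordiv_eq_ediv_of_pos (by omega : (0:Int) < 8)]; omega
    rw [hq]
    by_cases h0 : n.toNat / 8 = 0
    · simp [h0, hm, has7o]
    · rw [dif_neg h0]; simp [hm]
  | case3 n h =>
    rw [isOkayOctLoop, dif_neg h]
    have : n.toNat = 0 := by omega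
    rw [this, has7o]
    simp

lemma mem7_octDigits : ∀ n : Int, ('7' ∈ pyOctDigits n ↔ (0 < n ∧ has7o n.toNat = true)) := by
  intro n
  induction n using pyOctDigits.induct with
  | case1 n h ih =>
    rw [pyOctDigits, dif_pos h, has7o]
    have hq : (PySem.Int.floordiv n 8).toNat = n.toNat / 8 := by
      rw [PySem.Int.floordiv_eq_ediv_of_pos (by omega : (0:Int) < 8)]; omega
    have hm : (PySem.Int.mod n 8).toNat = n.toNat % 8 := by
      rw [PySem.Int.mod_eq_emod_of_pos (by omega : (0:Int) < 8)]; omega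
    have hfd : (0 < PySem.Int.floordiv n 8) ↔ ¬ n.toNat / 8 = 0 := by
      rw [PySem.Int.floordiv_eq_ediv_of_pos (by omega : (0:Int) < 8)]; omega
    simp only [List.mem_append, List.mem_singleton, ih, hq, hm, hfd,
      seven_eq_digitChar (n.toNat % 8) (by omega)]
    constructor
    · rintro (⟨h0, h7⟩ | h7)
      · exact ⟨h, by rw [dif_neg h0]; simp [h7]⟩
      · exact ⟨h, by simp [h7]⟩
    · rintro ⟨-, h7⟩
      simp only [Bool.or_eq_true, beq_iff_eq] at h7
      rcases h7 with h7 | h7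
      · exact Or.inr h7
      · split at h7
        · exact absurd h7 (by simp)
        · rename_i h0
          exact Or.inl ⟨h0, h7⟩
  | case2 n h =>
    rw [pyOctDigits, dif_neg h]
    simp; omega

lemma singleton_infix_iff {α : Type} (a : α) (l : List α) : [a] <:+: l ↔ a ∈ l := by
  constructor
  · intro h; exact h.subset (by simp)
  · intro h
    obtain ⟨s, t, rfl⟩ := List.append_of_mem h
    exact ⟨s, t, by simp⟩

lemma isIn7 (l : List Char) : PySem.Chars.isIn ['7'] l = true ↔ '7' ∈ l := by
  rw [PySem.Chars.isIn_iff_infix, singleton_infix_iff]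

-- ===== VERDICT (by name: the statement is the Claim_ definition above) =====
theorem isOkay_spec : Claim_equal_isOkay := by
  intro num _
  unfold Spec_isOkay isOkay isOkay_alt
  by_cases h : num ≤ 0
  · rw [if_pos h]
    rw [isOkayDecLoop, dif_neg (by omega), isOkayOctLoop, dif_neg (by omega)]
    simp
  · rw [if_neg h]
    have hslice : PySem.List.slice ('0'::'o'::pyOctDigits num) (some 2) none
        = pyOctDigits num := by
      have := PySem.List.slice_from_natCast ('0'::'o'::pyOctDigits num) 2
      simpa using this
    rw [hslice, decLoop_eq, octLoop_eq]
    have hd : PySem.Chars.isIn ['7'] (PySem.Int.toChars num) = has7d num.toNat := by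
      rw [Bool.eq_iff_iff, isIn7, mem7_toChars num (by omega)]
    have ho : PySem.Chars.isIn ['7'] (pyOctDigits num) = has7o num.toNat := by
      rw [Bool.eq_iff_iff, isIn7, mem7_octDigits num]
      simp [show (0:Int) < num from by omega]
    rw [hd, ho]
    cases has7d num.toNat <;> simp
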